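-- pv_equiv track=rewrite | github.com/kacpekwasny/pyTextEncryption | src/encryptor_statefull.py | fRotate
-- ===== SOURCE A (Python) =====
-- from copy import deepcopy
--
-- def fRotate(key_char_char_d, steps) -> dict:
--     """
--     Rotate this by eight steps
--     [0,1,2,3,4,5,6,7,8,9]
--     end with:
--     [2,3,4,5,6,7,8,9,0,1]
--     Rotate <list of len 12 by 15> == Rotate by 3
--
--     Unrotate by negating sign
--     """
--     key_char_char_d = deepcopy(key_char_char_d)
--
--     sign = steps
--     steps = abs(steps) % len(key_char_char_d) # ensures above
--     values = list(key_char_char_d.values())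
--
--     if sign >= 0:
--         values = values[-steps:] + values[:len(values) - steps]
--     else:
--         values = values[abs(steps):] + values[:abs(steps)]
--     # values are now rotated
--
--     # replace values with rotated
--     for k, v in zip(key_char_char_d, values):
--         key_char_char_d[k] = v
--
--     return key_char_char_d
-- ===== SOURCE B (Python) =====
-- from copy import deepcopy
--
-- def fRotate(key_char_char_d, steps) -> dict:
--     # One-pass modular indexing instead of slice/concat/zip/mutate.
--     key_char_char_d = deepcopy(key_char_char_d)
--     n = len(key_char_char_d)
--     s = abs(steps) % n
--     keys = list(key_char_char_d.keys())
--     vals = list(key_char_char_d.values())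
--     off = -s if steps >= 0 else s
--     return {keys[j]: vals[(j + off) % n] for j in range(n)}
-- ===== Notes on version B (the rewrite author's own statement) =====
-- stated objective: simpler
-- what changed: Replaces A's slice-and-concatenate rotation followed by a zip-driven in-place rewrite of the dict with a single dict comprehension that picks each value by modular indexing (vals[(j+off)%n]).
import Mathlib
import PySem

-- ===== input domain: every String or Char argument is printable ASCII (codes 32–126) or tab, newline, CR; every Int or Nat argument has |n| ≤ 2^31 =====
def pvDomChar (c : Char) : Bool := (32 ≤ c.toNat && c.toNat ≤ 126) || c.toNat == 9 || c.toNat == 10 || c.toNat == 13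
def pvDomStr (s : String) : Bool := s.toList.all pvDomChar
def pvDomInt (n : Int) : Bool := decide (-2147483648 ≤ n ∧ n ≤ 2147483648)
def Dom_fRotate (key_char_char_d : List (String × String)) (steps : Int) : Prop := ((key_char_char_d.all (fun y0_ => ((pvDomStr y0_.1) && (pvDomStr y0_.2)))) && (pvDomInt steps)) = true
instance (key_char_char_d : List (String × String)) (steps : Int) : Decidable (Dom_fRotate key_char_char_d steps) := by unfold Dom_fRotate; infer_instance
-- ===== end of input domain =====

-- B rotates the dict's values with one pass of modular indexing instead of A's slice/concat + zip + in-place rewrite (objective: simpler).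

-- ===== PORT A =====
def fRotate (key_char_char_d : List (String × String)) (steps : Int) : List (String × String) :=
  let d := PySem.Dict.mk key_char_char_d
  let sign := steps
  let s : Int := PySem.Int.mod (steps.natAbs : Int) (d.size : Int)
  let values := d.values
  let values' :=
    if sign ≥ 0 then
      PySem.List.slice values (some (-s)) none ++
        PySem.List.slice values none (some ((values.length : Int) - s))
    else
      PySem.List.slice values (some s) none ++ PySem.List.slice values none (some s)
  ((List.zip d.keys values').foldl (fun acc kv => acc.insert kv.1 kv.2) d).items

-- ===== PORT B =====
def fRotate_alt (key_char_char_d : List (String × String)) (steps : Int) : List (String × String) :=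
  let n := key_char_char_d.length
  let s : Nat := steps.natAbs % n
  let keys := key_char_char_d.map Prod.fst
  let vals := key_char_char_d.map Prod.snd
  let off : Int := if steps ≥ 0 then -(s : Int) else (s : Int)
  (List.range n).map (fun j =>
    (keys.getD j "", vals.getD (PySem.Int.mod ((j : Int) + off) (n : Int)).toNat ""))

-- ===== PRECONDITION & SPEC =====
-- Pre_ excludes the empty dict, on which A raises ZeroDivisionError, and lists with
-- duplicate keys, which do not represent a Python dict (the assoc-list behaviour there is accidental).
def Pre_fRotate (key_char_char_d : List (String × String)) (steps : Int) : Prop :=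
  key_char_char_d ≠ [] ∧ (key_char_char_d.map Prod.fst).Nodup
instance (key_char_char_d : List (String × String)) (steps : Int) : Decidable (Pre_fRotate key_char_char_d steps) := by unfold Pre_fRotate; infer_instance

def pvWitness_fRotate : (List (String × String)) × Int := ([("a", "x"), ("b", "y"), ("c", "z")], 2)

def Spec_fRotate (key_char_char_d : List (String × String)) (steps : Int) (out : List (String × String)) : Prop := out = fRotate_alt key_char_char_d steps
instance (key_char_char_d : List (String × String)) (steps : Int) (out : List (String × String)) : Decidable (Spec_fRotate key_char_char_d steps out) := by unfold Spec_fRotate; infer_instance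

-- ===== CLAIM (what is proved, stated in full; the proofs are below) =====
def Claim_equal_fRotate : Prop := ∀ (key_char_char_d : List (String × String)) (steps : Int), Dom_fRotate key_char_char_d steps → Pre_fRotate key_char_char_d steps → Spec_fRotate key_char_char_d steps (fRotate key_char_char_d steps)

-- ===== LEMMAS AND PROOFS =====

-- A's rewrite loop: inserting along zip(keys, w) replaces the first (zip …).length values in place.
lemma fold_insert_items (rest : List (String × String)) :
    ∀ (w : List String) (pre : List (String × String)),
    ((pre ++ rest).map Prod.fst).Nodup →
    ((List.zip (rest.map Prod.fst) w).foldl (fun d kv => PySem.Dict.insert d kv.1 kv.2)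
        (PySem.Dict.mk (pre ++ rest))).items
      = pre ++ List.zip (rest.map Prod.fst) w ++ rest.drop w.length := by
  induction rest with
  | nil => intro w pre h; simp
  | cons p rs ih =>
    intro w pre h
    cases w with
    | nil => simp
    | cons v vs =>
      simp only [List.map_cons, List.zip_cons_cons, List.foldl_cons, List.drop_succ_cons,
        List.length_cons]
      have h' := h
      simp only [List.map_append, List.map_cons, List.nodup_append, List.nodup_cons] at h'
      obtain ⟨hpreN, ⟨hprs, hrsN⟩, hdisj⟩ := h'
      have hpre : ∀ q ∈ pre, q.1 ≠ p.1 := fun q hq =>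
        hdisj q.1 (List.mem_map_of_mem hq) p.1 (by simp)
      have hrs : ∀ q ∈ rs, q.1 ≠ p.1 := fun q hq hq1 => hprs (hq1 ▸ List.mem_map_of_mem hq)
      have hc : (PySem.Dict.mk (pre ++ p :: rs)).contains p.1 = true := by
        rw [PySem.Dict.contains_iff_mem_keys]; simp [PySem.Dict.keys]
      have hins : (PySem.Dict.mk (pre ++ p :: rs)).insert p.1 v
          = PySem.Dict.mk ((pre ++ [(p.1, v)]) ++ rs) := by
        apply PySem.Dict.ext
        rw [PySem.Dict.items_insert_of_contains (h := hc)]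
        show (pre ++ p :: rs).map (fun q => if q.1 == p.1 then (p.1, v) else q) = _
        have m1 : pre.map (fun q => if q.1 == p.1 then (p.1, v) else q) = pre := by
          rw [List.map_congr_left (g := id) (fun q hq => by simp [hpre q hq])]; simp
        have m2 : rs.map (fun q => if q.1 == p.1 then (p.1, v) else q) = rs := by
          rw [List.map_congr_left (g := id) (fun q hq => by simp [hrs q hq])]; simp
        rw [List.map_append, List.map_cons, m1, m2]
        simp
      rw [hins, ih vs (pre ++ [(p.1, v)]) (by
        simp only [List.map_append, List.map_cons, List.map_nil] at h ⊢
        simpa using h)]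
      simp


lemma pymod_toNat_eq (a : Int) (n k : Nat) (hn : 0 < n) (hkn : k < n)
    (ha : a = k ∨ a + n = k ∨ a = k + n) :
    (PySem.Int.mod a (n : Int)).toNat = k := by
  have hpos : (0 : Int) < n := by exact_mod_cast hn
  rw [PySem.Int.mod_eq_emod_of_pos hpos]
  have hk' : (k : Int) % n = k :=
    Int.emod_eq_of_lt (by positivity) (by exact_mod_cast hkn)
  rcases ha with h | h | h
  · rw [h, hk']; simp
  · rw [← Int.add_emod_right, h, hk']; simp
  · rw [h, Int.add_emod_right, hk']; simp

lemma zip_eq_range_map (keys w vals : List String) (n : Nat) (t : Nat → Nat)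
    (hk : keys.length = n) (hwlen : n ≤ w.length) (hv : vals.length = n)
    (ht : ∀ j, j < n → t j < n)
    (hval : ∀ j (hj : j < n),
      w[j]'(lt_of_lt_of_le hj hwlen) = vals[t j]'(by rw [hv]; exact ht j hj)) :
    List.zip keys w = (List.range n).map (fun j => (keys.getD j "", vals.getD (t j) "")) := by
  apply List.ext_getElem
  · simp [hk]; omega
  · intro i h1 h2
    have hi : i < n := by simpa using h2
    simp only [List.getElem_map, List.getElem_range, List.getElem_zip]
    rw [List.getD_eq_getElem keys "" (by omega), List.getD_eq_getElem vals "" (by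
      rw [hv]; exact ht i hi)]
    exact Prod.ext rfl (hval i hi)


lemma fRotate_eq_alt (l : List (String × String)) (steps : Int) (hne : l ≠ [])
    (hnd : (l.map Prod.fst).Nodup) : fRotate l steps = fRotate_alt l steps := by
  have hn : 0 < l.length := List.length_pos_of_ne_nil hne
  simp only [fRotate, fRotate_alt, PySem.Dict.keys, PySem.Dict.values, PySem.Dict.size]
  have hfst : (List.map (fun x : String × String => x.1) l) = List.map Prod.fst l := rfl
  have hsnd : (List.map (fun x : String × String => x.2) l) = List.map Prod.snd l := rfl
  rw [hfst, hsnd]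
  set n := l.length with hnn
  set vals := List.map Prod.snd l with hvals
  have hvl : vals.length = n := by simp [hvals, hnn]
  have hkl : (List.map Prod.fst l).length = n := by simp [hnn]
  rw [show PySem.Int.mod (steps.natAbs : Int) (((PySem.Dict.mk l).items.length : Nat) : Int)
      = ((steps.natAbs % n : Nat) : Int) from by
    simpa using PySem.Int.mod_natCast steps.natAbs n]
  set sN := steps.natAbs % n with hsN
  have hsn : sN < n := Nat.mod_lt _ hn
  have hfold : ∀ w : List String,
      ((List.zip (List.map Prod.fst l) w).foldl (fun d kv => PySem.Dict.insert d kv.1 kv.2)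
        (PySem.Dict.mk l)).items = List.zip (List.map Prod.fst l) w ++ l.drop w.length := by
    intro w
    have := fold_insert_items l w [] (by simpa using hnd)
    simpa using this
  have hzlen : ∀ w : List String, (List.zip (List.map Prod.fst l) w).length = min n w.length := by
    intro w; simp [hkl]
  by_cases hsg : steps ≥ 0
  · simp only [if_pos hsg]
    rcases Nat.eq_zero_or_pos sN with h0 | hpos
    · -- sN = 0 : values' = vals ++ vals
      rw [h0]
      have e1 : PySem.List.slice vals (some (-((0 : Nat) : Int))) none = vals := by
        norm_num
      have e2 : PySem.List.slice vals none (some ((vals.length : Int) - ((0 : Nat) : Int)))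
          = vals := by
        norm_num [PySem.List.slice_to_natCast]
      rw [e1, e2, hfold]
      have hdrop : l.drop (vals ++ vals).length = [] := by
        apply List.drop_eq_nil_of_le; simp [hvl]; omega
      rw [hdrop, List.append_nil]
      refine zip_eq_range_map _ _ vals n
        (fun j => (PySem.Int.mod ((j : Int) + -((0:Nat) : Int)) (n : Int)).toNat)
        hkl (by simp [hvl]) hvl ?_ ?_
      · intro j hj
        show (PySem.Int.mod ((j : Int) + -((0:Nat) : Int)) (n : Int)).toNat < n
        rw [pymod_toNat_eq _ _ j hn hj (by left; push_cast; ring)]; exact hj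
      · intro j hj
        have ht : (PySem.Int.mod ((j : Int) + -((0:Nat) : Int)) (n : Int)).toNat = j :=
          pymod_toNat_eq _ _ j hn hj (by left; push_cast; ring)
        simp only [ht]
        rw [List.getElem_append_left (by omega)]
    · -- sN > 0 : values' = vals.drop (n - sN) ++ vals.take (n - sN)
      have e1 : PySem.List.slice vals (some (-(sN : Int))) none = vals.drop (n - sN) := by
        rw [PySem.List.slice_from_neg_natCast vals sN hpos, hvl]
      have e2 : PySem.List.slice vals none (some ((vals.length : Int) - (sN : Int)))
          = vals.take (n - sN) := by
        rw [show ((vals.length : Int) - (sN : Int)) = ((n - sN : Nat) : Int) from by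
          rw [hvl]; omega]
        exact PySem.List.slice_to_natCast vals (n - sN)
      rw [e1, e2, hfold]
      have hwl : (vals.drop (n - sN) ++ vals.take (n - sN)).length = n := by
        simp [hvl]
      rw [show l.drop (vals.drop (n - sN) ++ vals.take (n - sN)).length = [] from by
        apply List.drop_eq_nil_of_le; omega, List.append_nil]
      refine zip_eq_range_map _ _ vals n
        (fun j => (PySem.Int.mod ((j : Int) + -(sN : Int)) (n : Int)).toNat)
        hkl (by omega) hvl ?_ ?_
      · intro j hj
        by_cases hjs : j < sN
        · have : (PySem.Int.mod ((j : Int) + -(sN : Int)) (n : Int)).toNat = n - sN + j :=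
            pymod_toNat_eq _ _ _ hn (by omega) (by right; left; push_cast; omega)
          simp only [this]; omega
        · have : (PySem.Int.mod ((j : Int) + -(sN : Int)) (n : Int)).toNat = j - sN :=
            pymod_toNat_eq _ _ _ hn (by omega) (by left; omega)
          simp only [this]; omega
      · intro j hj
        by_cases hjs : j < sN
        · have ht : (PySem.Int.mod ((j : Int) + -(sN : Int)) (n : Int)).toNat = n - sN + j :=
            pymod_toNat_eq _ _ _ hn (by omega) (by right; left; push_cast; omega)
          simp only [ht]
          rw [List.getElem_append_left (by simp [hvl]; omega), List.getElem_drop]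
        · have ht : (PySem.Int.mod ((j : Int) + -(sN : Int)) (n : Int)).toNat = j - sN :=
            pymod_toNat_eq _ _ _ hn (by omega) (by left; omega)
          simp only [ht]
          rw [List.getElem_append_right (by simp [hvl]; omega)]
          rw [List.getElem_take]
          congr 1
          simp [hvl]
          omega
  · -- steps < 0 : values' = vals.drop sN ++ vals.take sN
    simp only [if_neg hsg]
    have e1 : PySem.List.slice vals (some (sN : Int)) none = vals.drop sN :=
      PySem.List.slice_from_natCast vals sN
    have e2 : PySem.List.slice vals none (some (sN : Int)) = vals.take sN :=
      PySem.List.slice_to_natCast vals sN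
    rw [e1, e2, hfold]
    have hwl : (vals.drop sN ++ vals.take sN).length = n := by simp [hvl]; omega
    rw [show l.drop (vals.drop sN ++ vals.take sN).length = [] from by
      apply List.drop_eq_nil_of_le; omega, List.append_nil]
    refine zip_eq_range_map _ _ vals n
      (fun j => (PySem.Int.mod ((j : Int) + (sN : Int)) (n : Int)).toNat)
      hkl (by omega) hvl ?_ ?_
    · intro j hj
      by_cases hjs : j < n - sN
      · have : (PySem.Int.mod ((j : Int) + (sN : Int)) (n : Int)).toNat = j + sN :=
          pymod_toNat_eq _ _ _ hn (by omega) (by left; push_cast; omega)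
        simp only [this]; omega
      · have : (PySem.Int.mod ((j : Int) + (sN : Int)) (n : Int)).toNat = j + sN - n :=
          pymod_toNat_eq _ _ _ hn (by omega) (by right; right; omega)
        simp only [this]; omega
    · intro j hj
      by_cases hjs : j < n - sN
      · have ht : (PySem.Int.mod ((j : Int) + (sN : Int)) (n : Int)).toNat = j + sN :=
          pymod_toNat_eq _ _ _ hn (by omega) (by left; push_cast; omega)
        simp only [ht]
        rw [List.getElem_append_left (by simp [hvl]; omega), List.getElem_drop]
        congr 1; omega
      · have ht : (PySem.Int.mod ((j : Int) + (sN : Int)) (n : Int)).toNat = j + sN - n :=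
          pymod_toNat_eq _ _ _ hn (by omega) (by right; right; omega)
        simp only [ht]
        rw [List.getElem_append_right (by simp [hvl]; omega)]
        rw [List.getElem_take]
        congr 1
        simp [hvl]
        omega


-- ===== VERDICT (by name: the statement is the Claim_ definition above) =====
theorem fRotate_spec : Claim_equal_fRotate := by
  intro l steps _ hpre
  exact fRotate_eq_alt l steps hpre.1 hpre.2
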